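-- pv_equiv track=rewrite | github.com/zhuang5252/ARCoarseProject_perf | air_track/detector/special_test/check_and_change_distance.py | find_next_normal_idx
-- ===== SOURCE A (Python) =====
-- def find_next_normal_idx(peaks, idx, max_idx=749):
--     """递归找下一个正常数据的idx索引"""
--     if idx > max_idx:
--         assert 'Not find next_idx, or data all error.'
--     if idx in peaks:
--         idx += 1
--         return find_next_normal_idx(peaks, idx)
--     else:
--         return idx
-- ===== SOURCE B (Python) =====
-- def find_next_normal_idx(peaks, idx, max_idx=749):
--     """Sort the distinct peaks once, then scan them to find the first free index."""
--     ans = idx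
--     for p in sorted(set(peaks)):
--         if p == ans:
--             ans += 1
--         elif p > ans:
--             break
--     return ans
-- ===== Notes on version B (the rewrite author's own statement) =====
-- stated objective: alternative
-- what changed: Replaced the tail recursion that re-scans the list with an 'in' test at every step by a sort-then-scan: build sorted(set(peaks)) once and walk it with an early break, advancing the answer past each matching peak.
import Mathlib
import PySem

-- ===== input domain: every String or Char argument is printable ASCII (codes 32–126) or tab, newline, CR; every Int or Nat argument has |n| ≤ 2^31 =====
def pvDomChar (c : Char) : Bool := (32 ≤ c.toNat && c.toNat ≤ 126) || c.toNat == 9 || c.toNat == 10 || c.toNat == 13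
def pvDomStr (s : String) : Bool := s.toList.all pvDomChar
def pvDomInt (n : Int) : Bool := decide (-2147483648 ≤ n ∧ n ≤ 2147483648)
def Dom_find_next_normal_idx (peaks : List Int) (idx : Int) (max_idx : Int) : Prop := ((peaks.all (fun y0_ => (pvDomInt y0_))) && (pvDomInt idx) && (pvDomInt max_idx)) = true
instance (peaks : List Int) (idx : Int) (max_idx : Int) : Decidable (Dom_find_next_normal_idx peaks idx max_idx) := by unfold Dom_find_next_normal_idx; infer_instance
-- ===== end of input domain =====

-- B replaces A's tail recursion with repeated membership tests by a single sort of the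
-- distinct peaks followed by one linear scan (alternative algorithm, same return value).


-- ===== PORT A =====
-- A's recursion; the `if idx > max_idx: assert '…'` line is a no-op (assert of a
-- non-empty string literal never fires), so it contributes nothing to the value.
-- The recursive call passes only (peaks, idx), so max_idx reverts to the default 749.
def fnA (peaks : List Int) (idx : Int) (max_idx : Int) : Int :=
  if idx ∈ peaks then fnA peaks (idx + 1) 749 else idx
termination_by (peaks.filter (fun p => decide (idx ≤ p))).length
decreasing_by
  have h1 : peaks.filter (fun p => decide (idx + 1 ≤ p))
      = (peaks.filter (fun p => decide (idx ≤ p))).filter (fun p => decide (idx + 1 ≤ p)) := by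
    rw [List.filter_filter]
    apply List.filter_congr
    intro x _
    by_cases hx : idx + 1 ≤ x
    · have : idx ≤ x := by omega
      simp [hx, this]
    · simp [hx]
  rw [h1]
  apply List.length_filter_lt_length_iff_exists.mpr
  refine ⟨idx, ?_, by simp⟩
  simp only [List.mem_filter]
  exact ⟨by assumption, by simp⟩

def find_next_normal_idx (peaks : List Int) (idx : Int) (max_idx : Int) : Option Int :=
  some (fnA peaks idx max_idx)

-- ===== PORT B =====
-- scan of `for p in sorted(set(peaks))` with the early `break`
def goB (l : List Int) (ans : Int) : Int :=
  match l with
  | [] => ans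
  | p :: rest => if p = ans then goB rest (ans + 1) else if ans < p then ans else goB rest ans

def find_next_normal_idx_alt (peaks : List Int) (idx : Int) (max_idx : Int) : Option Int :=
  some (goB (PySem.List.sorted (PySem.Set.ofList peaks) (fun x => x) false) idx)

-- ===== PRECONDITION & SPEC =====
def Spec_find_next_normal_idx (peaks : List Int) (idx : Int) (max_idx : Int) (out : Option Int) : Prop := out = find_next_normal_idx_alt peaks idx max_idx
instance (peaks : List Int) (idx : Int) (max_idx : Int) (out : Option Int) : Decidable (Spec_find_next_normal_idx peaks idx max_idx out) := by unfold Spec_find_next_normal_idx; infer_instance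

-- ===== CLAIM (what is proved, stated in full; the proofs are below) =====
def Claim_equal_find_next_normal_idx : Prop := ∀ (peaks : List Int) (idx : Int) (max_idx : Int), Dom_find_next_normal_idx peaks idx max_idx → Spec_find_next_normal_idx peaks idx max_idx (find_next_normal_idx peaks idx max_idx)

-- ===== LEMMAS AND PROOFS =====

-- fnA ignores its max_idx argument
theorem fnA_m_irrel (peaks : List Int) (idx m m' : Int) : fnA peaks idx m = fnA peaks idx m' := by
  conv_lhs => rw [fnA]
  conv_rhs => rw [fnA]

-- fnA depends on peaks only through membership
theorem fnA_congr (l2 : List Int) (l1 : List Int) (idx m : Int)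
    (h : ∀ x : Int, x ∈ l1 ↔ x ∈ l2) : fnA l1 idx m = fnA l2 idx m := by
  induction idx, m using fnA.induct (peaks := l1) with
  | case1 idx m hmem ih =>
    conv_lhs => rw [fnA]
    conv_rhs => rw [fnA]
    rw [if_pos hmem, if_pos ((h idx).mp hmem)]
    exact ih.trans (fnA_m_irrel _ _ _ _)
  | case2 idx m hmem =>
    conv_lhs => rw [fnA]
    conv_rhs => rw [fnA]
    rw [if_neg hmem, if_neg (fun hc => hmem ((h idx).mpr hc))]

-- a head strictly below the current index never matters again
theorem fnA_cons_gt (p : Int) (rest : List Int) : ∀ (idx m : Int), p < idx →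
    fnA (p :: rest) idx m = fnA rest idx m := by
  intro idx m
  induction idx, m using fnA.induct (peaks := rest) with
  | case1 idx m hmem ih =>
    intro _
    have hmem' : idx ∈ p :: rest := List.mem_cons_of_mem _ hmem
    conv_lhs => rw [fnA]
    conv_rhs => rw [fnA]
    rw [if_pos hmem', if_pos hmem]
    exact ih (by omega)
  | case2 idx m hmem =>
    intro hp
    have hmem' : idx ∉ p :: rest := by
      simp only [List.mem_cons, not_or]
      exact ⟨by omega, hmem⟩
    conv_lhs => rw [fnA]
    conv_rhs => rw [fnA]
    rw [if_neg hmem', if_neg hmem]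

-- on a strictly increasing list, the scan computes A's recursion
theorem goB_eq_fnA (l : List Int) : ∀ (ans m : Int), l.Pairwise (· < ·) →
    goB l ans = fnA l ans m := by
  induction l with
  | nil =>
    intro ans m _
    rw [goB, fnA]
    simp
  | cons p rest ih =>
    intro ans m hpair
    have hrest : rest.Pairwise (· < ·) := hpair.tail
    have hgt : ∀ x ∈ rest, p < x := fun x hx => List.rel_of_pairwise_cons hpair hx
    rw [goB]
    by_cases h1 : p = ans
    · subst h1
      rw [if_pos rfl]
      conv_rhs => rw [fnA]
      rw [if_pos (List.mem_cons_self ..), fnA_cons_gt p rest (p + 1) 749 (by omega)]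
      exact ih (p + 1) 749 hrest
    · rw [if_neg h1]
      by_cases h2 : ans < p
      · have hnotmem : ans ∉ p :: rest := by
          simp only [List.mem_cons, not_or]
          exact ⟨fun hc => h1 hc.symm, fun hc => absurd (hgt ans hc) (by omega)⟩
        rw [if_pos h2]
        conv_rhs => rw [fnA]
        rw [if_neg hnotmem]
      · have hlt : p < ans := by omega
        rw [if_neg h2, fnA_cons_gt p rest ans m hlt]
        exact ih ans m hrest

-- ===== VERDICT (by name: the statement is the Claim_ definition above) =====
theorem find_next_normal_idx_spec : Claim_equal_find_next_normal_idx := by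
  intro peaks idx max_idx _
  unfold Spec_find_next_normal_idx find_next_normal_idx find_next_normal_idx_alt
  congr 1
  have hmem : ∀ x : Int, x ∈ peaks ↔
      x ∈ PySem.List.sorted (PySem.Set.ofList peaks) (fun x => x) false := by
    intro x
    rw [PySem.List.mem_sorted, PySem.Set.mem_ofList]
  rw [fnA_congr _ peaks idx max_idx hmem,
      goB_eq_fnA _ idx max_idx (PySem.List.sorted_ofList_pairwise_lt peaks)]
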